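-- pv_equiv track=rewrite | github.com/SAG145/Project-Euler | PEP778 - Freshman's Product.py | F
-- ===== SOURCE A (Python) =====
-- def u(fresh,opti1,opti2):
--     new = [0]*10
--     for d1 in range(10):
--         for d2 in range(10):
--             new[fresh[d1][d2]] += opti1[d1]*opti2[d2]
--     return new
--
-- def f(fresh,mod,orig,R):
--     if R == 1:
--         return orig
--     t = f(fresh,mod,orig,R // 2)
--     opti = u(fresh,t,t)
--     if R % 2 == 1:
--         opti = u(fresh,opti,orig)
--     for i in range(len(opti)):
--         opti[i] %= mod
--     return opti
--
-- def F(R,M):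
--     fresh = []
--     for d1 in range(10):
--         fre = []
--         for d2 in range(10):
--             fre.append(d1*d2 % 10)
--         fresh.append(fre)
--
--     origs = []
--     for _ in range(len(str(M))):
--         origs.append([0]*10)
--     for x in range(M + 1):
--         i = 0
--         while x > 0:
--             origs[i][x % 10] += 1
--             x //= 10
--             i += 1
--     s = 0
--     for j in range(len(str(M))):
--         f1 = f(fresh,10**9 + 9,origs[j],R)
--         t = 0
--         for d in range(10):
--             t += d*f1[d]
--         s += t*10**j
--     return s % (10**9 + 9)
-- ===== SOURCE B (Python) =====
-- # B: closed-form digit-position counting over [0, M] (no enumeration of every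
-- # integer) + iterative MSB-first binary exponentiation (no recursion, no
-- # precomputed product table).  Same result as A for every R >= 1.
--
-- MOD = 10 ** 9 + 9
--
--
-- def _mul(a, b):
--     """Freshman's product of two digit-count vectors."""
--     new = [0] * 10
--     for d1 in range(10):
--         for d2 in range(10):
--             new[d1 * d2 % 10] += a[d1] * b[d2]
--     return new
--
--
-- def _power(v, R):
--     """v raised to the R-th freshman power, reduced mod MOD (R >= 1)."""
--     bits = []
--     n = R
--     while n > 1:
--         bits.append(n % 2)
--         n //= 2
--     bits.reverse()  # bits of R below the leading 1, most significant first
--     res = v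
--     for b in bits:
--         res = _mul(res, res)
--         if b == 1:
--             res = _mul(res, v)
--         res = [c % MOD for c in res]
--     return res
--
--
-- def F(R, M):
--     s = 0
--     p = 1  # 10**j for the current digit position j
--     while p <= M:
--         # counts of digit d at position j over 1..M, leading zeros not counted
--         high = M // (10 * p)
--         cur = M // p % 10
--         low = M % p
--         cnt = []
--         for d in range(10):
--             c = high * p
--             if d < cur:
--                 c += p
--             elif d == cur:
--                 c += low + 1
--             if d == 0:
--                 c -= min(M + 1, p)  # drop the x < 10*p whose digit j is a leading zero
--             cnt.append(c)
--         f1 = _power(cnt, R)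
--         t = 0
--         for d in range(10):
--             t += d * f1[d]
--         s += t * p
--         p *= 10
--     return s % MOD
-- ===== Notes on version B (the rewrite author's own statement) =====
-- stated objective: faster
-- what changed: B computes each digit-position frequency table over [0,M] with a closed-form high/current/low counting formula instead of A's enumeration of every integer in [0,M], and raises it to the R-th freshman power with an iterative MSB-first binary-exponentiation loop (explicit bit list, no product table) instead of A's recursive halving.
import Mathlib
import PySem

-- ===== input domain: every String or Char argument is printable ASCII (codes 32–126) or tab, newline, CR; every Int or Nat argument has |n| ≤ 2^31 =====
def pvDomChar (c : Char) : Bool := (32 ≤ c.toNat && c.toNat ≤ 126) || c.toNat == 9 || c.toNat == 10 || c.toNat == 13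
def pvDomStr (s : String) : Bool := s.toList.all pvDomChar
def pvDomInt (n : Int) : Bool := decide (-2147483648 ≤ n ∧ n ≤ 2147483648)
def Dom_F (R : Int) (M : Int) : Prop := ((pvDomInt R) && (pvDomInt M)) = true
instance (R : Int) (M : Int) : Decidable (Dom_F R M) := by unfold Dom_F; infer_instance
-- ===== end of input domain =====

-- B replaces A's enumeration of every integer in [0, M] by closed-form per-position
-- digit counting and A's recursive halving by an iterative MSB-first bit loop (faster, asymptotic).


-- ===== PORT A =====

-- the 10×10 table fresh[d1][d2] = d1*d2 % 10, built by A's appending loops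
def freshA : List (List Int) :=
  (PySem.List.pyRange 0 10 1).foldl (fun fresh d1 =>
    fresh ++ [(PySem.List.pyRange 0 10 1).foldl
      (fun fre d2 => fre ++ [PySem.Int.mod (d1 * d2) 10]) []]) []

-- u(fresh, opti1, opti2); every index is in 0..9, so `.toNat`/`getD` are exact here
def uA (fresh : List (List Int)) (opti1 opti2 : List Int) : List Int :=
  (PySem.List.pyRange 0 10 1).foldl (fun new d1 =>
    (PySem.List.pyRange 0 10 1).foldl (fun new d2 =>
      let idx := ((fresh.getD d1.toNat []).getD d2.toNat 0).toNat
      new.set idx (new.getD idx 0 + opti1.getD d1.toNat 0 * opti2.getD d2.toNat 0)) new)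
    [0, 0, 0, 0, 0, 0, 0, 0, 0, 0]

-- f(fresh, mod, orig, R); Python returns orig when R == 1 and never terminates for
-- R ≤ 0 (excluded by Pre_F), so the guard `R ≤ 1` only totalizes the recursion
def fA (fresh : List (List Int)) (m : Int) (orig : List Int) (R : Int) : List Int :=
  if _h : R ≤ 1 then orig
  else
    let t := fA fresh m orig (PySem.Int.floordiv R 2)
    let opti := uA fresh t t
    let opti := if PySem.Int.mod R 2 = 1 then uA fresh opti orig else opti
    opti.map (fun v => PySem.Int.mod v m)
termination_by R.toNat
decreasing_by
  rw [PySem.Int.floordiv_eq_ediv_of_pos (by omega)]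
  omega

-- the inner `while x > 0` digit loop; the written index i is always in range in A
def digitLoopA (origs : List (List Int)) (x : Int) (i : Nat) : List (List Int) :=
  if _h : 0 < x then
    let d := (PySem.Int.mod x 10).toNat
    digitLoopA (origs.set i ((origs.getD i []).set d ((origs.getD i []).getD d 0 + 1)))
      (PySem.Int.floordiv x 10) (i + 1)
  else origs
termination_by x.toNat
decreasing_by
  rw [PySem.Int.floordiv_eq_ediv_of_pos (by omega)]
  omega

def F (R : Int) (M : Int) : Int :=
  let fresh := freshA
  let L : Nat := (PySem.Int.toStr M).length
  let origs0 := List.replicate L [0, 0, 0, 0, 0, 0, 0, 0, 0, 0]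
  let origs := (PySem.List.pyRange 0 (M + 1) 1).foldl (fun og x => digitLoopA og x 0) origs0
  let s := (PySem.List.pyRange 0 (L : Int) 1).foldl (fun s j =>
      let f1 := fA fresh 1000000009 (origs.getD j.toNat []) R
      let t := (PySem.List.pyRange 0 10 1).foldl (fun t d => t + d * f1.getD d.toNat 0) 0
      s + t * 10 ^ j.toNat) 0
  PySem.Int.mod s 1000000009

-- ===== PORT B =====

-- _mul(a, b); every index is in 0..9, so `.toNat`/`getD` are exact here
def mulB (a b : List Int) : List Int :=
  (PySem.List.pyRange 0 10 1).foldl (fun new d1 =>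
    (PySem.List.pyRange 0 10 1).foldl (fun new d2 =>
      let idx := (PySem.Int.mod (d1 * d2) 10).toNat
      new.set idx (new.getD idx 0 + a.getD d1.toNat 0 * b.getD d2.toNat 0)) new)
    [0, 0, 0, 0, 0, 0, 0, 0, 0, 0]

-- the `while n > 1` bit-collecting loop of _power
def bitsAuxB (n : Int) (acc : List Int) : List Int :=
  if _h : 1 < n then bitsAuxB (PySem.Int.floordiv n 2) (acc ++ [PySem.Int.mod n 2]) else acc
termination_by n.toNat
decreasing_by
  rw [PySem.Int.floordiv_eq_ediv_of_pos (by omega)]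
  omega

def powerB (v : List Int) (R : Int) : List Int :=
  let bits := (bitsAuxB R []).reverse
  bits.foldl (fun res b =>
    let res := mulB res res
    let res := if b = 1 then mulB res v else res
    res.map (fun c => PySem.Int.mod c 1000000009)) v

-- the `while p <= M` loop of B; `0 < p` is a totality guard only (p starts at 1
-- and is only ever multiplied by 10, so it always holds on reachable states)
def loopB (R M s p : Int) : Int :=
  if _h : p ≤ M ∧ 0 < p then
    let high := PySem.Int.floordiv M (10 * p)
    let cur := PySem.Int.mod (PySem.Int.floordiv M p) 10
    let low := PySem.Int.mod M p
    let cnt := (PySem.List.pyRange 0 10 1).foldl (fun cnt d =>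
        let c := high * p
        let c := if d < cur then c + p else if d = cur then c + low + 1 else c
        let c := if d = 0 then c - min (M + 1) p else c
        cnt ++ [c]) []
    let f1 := powerB cnt R
    let t := (PySem.List.pyRange 0 10 1).foldl (fun t d => t + d * f1.getD d.toNat 0) 0
    loopB R M (s + t * p) (10 * p)
  else PySem.Int.mod s 1000000009
termination_by (M + 1 - p).toNat
decreasing_by omega

def F_alt (R : Int) (M : Int) : Int := loopB R M 0 1

-- ===== PRECONDITION & SPEC =====

-- Pre_F excludes exactly R ≤ 0, on which Python's f recurses forever (RecursionError)
def Pre_F (R : Int) (M : Int) : Prop := 1 ≤ R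
instance (R : Int) (M : Int) : Decidable (Pre_F R M) := by unfold Pre_F; infer_instance

def pvWitness_F : Int × Int := (5, 37)

def Spec_F (R : Int) (M : Int) (out : Int) : Prop := out = F_alt R M
instance (R : Int) (M : Int) (out : Int) : Decidable (Spec_F R M out) := by
  unfold Spec_F; infer_instance

-- ===== CLAIM (what is proved, stated in full; the proofs are below) =====
def Claim_equal_F : Prop := ∀ (R : Int) (M : Int), Dom_F R M → Pre_F R M → Spec_F R M (F R M)

-- ===== LEMMAS AND PROOFS =====

def rowZ : List Int := [0, 0, 0, 0, 0, 0, 0, 0, 0, 0]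

-- ---- B's multiply equals A's table-driven multiply ----

theorem freshA_get (d1 d2 : Int) (h1 : d1 ∈ PySem.List.pyRange 0 10 1)
    (h2 : d2 ∈ PySem.List.pyRange 0 10 1) :
    (freshA.getD d1.toNat []).getD d2.toNat 0 = PySem.Int.mod (d1 * d2) 10 := by
  rw [PySem.List.mem_pyRange_one] at h1 h2
  obtain ⟨ha, hb⟩ := h1; obtain ⟨hc, hd⟩ := h2
  interval_cases d1 <;> interval_cases d2 <;> decide

theorem mul_eq (a b : List Int) : uA freshA a b = mulB a b := by
  unfold uA mulB
  apply PySem.List.foldl_congr_mem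
  intro acc d1 h1
  apply PySem.List.foldl_congr_mem
  intro acc2 d2 h2
  rw [freshA_get d1 d2 h1 h2]

-- ---- A's recursive powering equals B's MSB-first iterative powering ----

theorem bitsAuxB_stop {n : Int} (h : ¬ 1 < n) (acc : List Int) : bitsAuxB n acc = acc := by
  conv_lhs => rw [bitsAuxB]
  rw [dif_neg h]

theorem bitsAuxB_go {n : Int} (h : 1 < n) (acc : List Int) :
    bitsAuxB n acc = bitsAuxB (PySem.Int.floordiv n 2) (acc ++ [PySem.Int.mod n 2]) := by
  conv_lhs => rw [bitsAuxB]
  rw [dif_pos h]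

theorem bitsAuxB_acc_aux : ∀ (k : Nat) (n : Int), n.toNat ≤ k →
    ∀ acc, bitsAuxB n acc = acc ++ bitsAuxB n [] := by
  intro k
  induction k with
  | zero =>
    intro n hn acc
    have h : ¬ 1 < n := by omega
    rw [bitsAuxB_stop h, bitsAuxB_stop h]
    simp
  | succ k ih =>
    intro n hn acc
    by_cases h : 1 < n
    · rw [bitsAuxB_go h, bitsAuxB_go h]
      have h2 : (PySem.Int.floordiv n 2).toNat ≤ k := by
        rw [PySem.Int.floordiv_eq_ediv_of_pos (by omega)]; omega
      rw [ih _ h2, ih _ h2 (([] : List Int) ++ [PySem.Int.mod n 2])]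
      simp
    · rw [bitsAuxB_stop h, bitsAuxB_stop h]
      simp

theorem bitsAuxB_acc (n : Int) (acc : List Int) :
    bitsAuxB n acc = acc ++ bitsAuxB n [] :=
  bitsAuxB_acc_aux n.toNat n le_rfl acc

def stepP (v : List Int) (res : List Int) (b : Int) : List Int :=
  ((if b = 1 then mulB (mulB res res) v else mulB res res).map
    (fun c => PySem.Int.mod c 1000000009))

theorem powerB_eq_foldl (v : List Int) (R : Int) :
    powerB v R = ((bitsAuxB R []).reverse).foldl (stepP v) v := by
  unfold powerB stepP
  apply PySem.List.foldl_congr_mem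
  intro acc x _
  by_cases h : x = 1 <;> simp [h]

theorem bits_rec (R : Int) (h : 1 < R) :
    (bitsAuxB R []).reverse
      = (bitsAuxB (PySem.Int.floordiv R 2) []).reverse ++ [PySem.Int.mod R 2] := by
  rw [bitsAuxB_go h, bitsAuxB_acc]
  simp

theorem power_eq (v : List Int) (R : Int) :
    fA freshA 1000000009 v R = powerB v R := by
  induction R using fA.induct freshA 1000000009 v with
  | case1 R h =>
    rw [fA, dif_pos h, powerB_eq_foldl, bitsAuxB_stop (by omega)]
    simp
  | case2 R h ih =>
    rw [fA, dif_neg h, powerB_eq_foldl, bits_rec R (by omega), List.foldl_append]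
    rw [← powerB_eq_foldl, ← ih]
    simp only [List.foldl_cons, List.foldl_nil, stepP]
    rw [mul_eq]
    by_cases hm : PySem.Int.mod R 2 = 1 <;> simp [hm, mul_eq]

-- ---- the digit-count table built by A, entrywise ----

def Etab (tbl : List (List Int)) (j d : Nat) : Int := (tbl.getD j []).getD d 0

def indF (x p d : Int) : Int :=
  if 0 < PySem.Int.floordiv x p ∧ PySem.Int.mod (PySem.Int.floordiv x p) 10 = d then 1 else 0

def cntSpec (N p d : Int) : Int := ((PySem.List.pyRange 0 N 1).map (fun x => indF x p d)).sum

-- B's closed-form count, in exactly the shape B computes it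
def formulaB (M p d : Int) : Int :=
  let high := PySem.Int.floordiv M (10 * p)
  let cur := PySem.Int.mod (PySem.Int.floordiv M p) 10
  let low := PySem.Int.mod M p
  let c := high * p
  let c := if d < cur then c + p else if d = cur then c + low + 1 else c
  if d = 0 then c - min (M + 1) p else c

theorem digitLoopA_stop {x : Int} (h : ¬ 0 < x) (tbl : List (List Int)) (i : Nat) :
    digitLoopA tbl x i = tbl := by
  conv_lhs => rw [digitLoopA]
  rw [dif_neg h]

theorem digitLoopA_go {x : Int} (h : 0 < x) (tbl : List (List Int)) (i : Nat) :
    digitLoopA tbl x i =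
      digitLoopA
        (tbl.set i ((tbl.getD i []).set (PySem.Int.mod x 10).toNat
          ((tbl.getD i []).getD (PySem.Int.mod x 10).toNat 0 + 1)))
        (PySem.Int.floordiv x 10) (i + 1) := by
  conv_lhs => rw [digitLoopA]
  rw [dif_pos h]

theorem set_rows (tbl : List (List Int)) (i : Nat) (dgt : Nat) (v : Int)
    (hr : ∀ r ∈ tbl, r.length = 10) :
    ∀ r ∈ tbl.set i ((tbl.getD i []).set dgt v), r.length = 10 := by
  intro r hrm
  rcases List.mem_or_eq_of_mem_set hrm with hmem | he
  · exact hr r hmem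
  · by_cases hi : i < tbl.length
    · rw [he, List.length_set, List.getD_eq_getElem _ _ hi]
      exact hr _ (List.getElem_mem hi)
    · rw [List.set_eq_of_length_le (by omega)] at hrm
      exact hr r hrm

theorem digitLoopA_len : ∀ (tbl : List (List Int)) (x : Int) (i : Nat),
    (digitLoopA tbl x i).length = tbl.length := by
  intro tbl x i
  induction tbl, x, i using digitLoopA.induct with
  | case1 tbl x i h _d ih =>
    rw [digitLoopA_go h]
    exact ih.trans (by simp)
  | case2 tbl x i h => rw [digitLoopA_stop h]

theorem digitLoopA_rows : ∀ (tbl : List (List Int)) (x : Int) (i : Nat),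
    (∀ r ∈ tbl, r.length = 10) → ∀ r ∈ digitLoopA tbl x i, r.length = 10 := by
  intro tbl x i
  induction tbl, x, i using digitLoopA.induct with
  | case1 tbl x i h _d ih =>
    intro hr
    rw [digitLoopA_go h]
    exact ih (set_rows _ _ _ _ hr)
  | case2 tbl x i h =>
    intro hr
    rw [digitLoopA_stop h]
    exact hr

theorem mod10_bounds (x : Int) : 0 ≤ PySem.Int.mod x 10 ∧ PySem.Int.mod x 10 < 10 := by
  rw [PySem.Int.mod_eq_emod_of_pos (by norm_num)]
  constructor
  · exact Int.emod_nonneg x (by norm_num)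
  · exact Int.emod_lt_of_pos x (by norm_num)

theorem entry_set_self (tbl : List (List Int)) (j d dgt : Nat) (hj : j < tbl.length)
    (hrow : (tbl.getD j []).length = 10) (hdgt : dgt < 10) :
    Etab (tbl.set j ((tbl.getD j []).set dgt ((tbl.getD j []).getD dgt 0 + 1))) j d
      = Etab tbl j d + (if dgt = d then 1 else 0) := by
  unfold Etab
  rw [List.getD_eq_getElem?_getD (l := tbl.set j _), List.getElem?_set]
  simp only [if_pos rfl, hj, if_true, Option.getD_some]
  rw [List.getD_eq_getElem?_getD (l := (tbl.getD j []).set dgt _), List.getElem?_set]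
  by_cases hdd : dgt = d
  · subst hdd
    rw [if_pos rfl, if_pos (by omega), List.getD_eq_getElem?_getD]
    by_cases hlt : dgt < (tbl.getD j []).length
    · simp
    · omega
  · rw [if_neg hdd, ← List.getD_eq_getElem?_getD, if_neg hdd, add_zero]

theorem entry_set_other (tbl : List (List Int)) (i j d : Nat) (row : List Int) (hji : j ≠ i) :
    Etab (tbl.set i row) j d = Etab tbl j d := by
  unfold Etab
  rw [List.getD_eq_getElem?_getD (l := tbl.set i _), List.getElem?_set,
    if_neg (fun hh => hji hh.symm), ← List.getD_eq_getElem?_getD]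

theorem digitLoopA_entry : ∀ (tbl : List (List Int)) (x : Int) (i : Nat), 0 ≤ x →
    ∀ (j d : Nat), (∀ r ∈ tbl, r.length = 10) → j < tbl.length → d < 10 →
    Etab (digitLoopA tbl x i) j d
      = Etab tbl j d +
        (if i ≤ j ∧ 0 < PySem.Int.floordiv x (10 ^ (j - i)) ∧
            PySem.Int.mod (PySem.Int.floordiv x (10 ^ (j - i))) 10 = (d : Int) then 1 else 0) := by
  intro tbl x i
  induction tbl, x, i using digitLoopA.induct with
  | case2 tbl x i h =>
    intro hx j d _hr _hj _hd
    rw [digitLoopA_stop h]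
    have hx0 : x = 0 := by omega
    subst hx0
    have hz : PySem.Int.floordiv 0 ((10:Int) ^ (j - i)) = 0 := by
      rw [PySem.Int.floordiv_eq_ediv_of_pos (by positivity)]
      exact Int.zero_ediv _
    simp [hz]
  | case1 tbl x i h _d ih =>
    intro _hx j d hr hj hd
    rw [digitLoopA_go h]
    have hx10 : (0:Int) ≤ PySem.Int.floordiv x 10 := by
      rw [PySem.Int.floordiv_eq_ediv_of_pos (by norm_num)]
      exact Int.ediv_nonneg (by omega) (by norm_num)
    have hdgt := mod10_bounds x
    have hrows' := set_rows tbl i (PySem.Int.mod x 10).toNat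
      ((tbl.getD i []).getD (PySem.Int.mod x 10).toNat 0 + 1) hr
    rw [ih hx10 j d hrows' (by simpa using hj) hd]
    by_cases hji : j = i
    · subst hji
      have hrow : (tbl.getD j []).length = 10 := by
        rw [List.getD_eq_getElem _ _ hj]
        exact hr _ (List.getElem_mem hj)
      rw [entry_set_self tbl j d (PySem.Int.mod x 10).toNat hj hrow (by omega)]
      have h1 : ¬ (j + 1 ≤ j) := by omega
      have h2 : (10:Int) ^ (j - j) = 1 := by simp
      have h3 : PySem.Int.floordiv x 1 = x := by
        rw [PySem.Int.floordiv_eq_ediv_of_pos (by norm_num)]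
        exact Int.ediv_one x
      simp only [h1, false_and, if_false, add_zero, h2, h3, le_refl, true_and, h]
      have hiff : (PySem.Int.mod x 10 = (d:Int)) ↔ ((PySem.Int.mod x 10).toNat = d) := by omega
      by_cases hc : (PySem.Int.mod x 10).toNat = d
      · rw [if_pos (hiff.mpr hc), if_pos hc]
      · rw [if_neg (fun hx' => hc (hiff.mp hx')), if_neg hc]
    · rw [entry_set_other tbl i j d _ hji]
      congr 1
      by_cases hij : i ≤ j
      · have hij1 : i + 1 ≤ j := by omega
        have hpow : (10:Int) ^ (j - i) = 10 * 10 ^ (j - (i+1)) := by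
          rw [← pow_succ']
          congr 1
          omega
        have hdivdiv : PySem.Int.floordiv (PySem.Int.floordiv x 10) ((10:Int) ^ (j - (i+1)))
            = PySem.Int.floordiv x ((10:Int) ^ (j - i)) := by
          rw [PySem.Int.floordiv_eq_ediv_of_pos (by positivity),
              PySem.Int.floordiv_eq_ediv_of_pos (by norm_num),
              PySem.Int.floordiv_eq_ediv_of_pos (by positivity), hpow]
          exact Int.ediv_ediv_of_nonneg (by norm_num)
        rw [hdivdiv]
        simp [hij, hij1]
      · have hij1 : ¬ (i + 1 ≤ j) := by omega
        simp [hij, hij1]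

-- ---- the whole table after processing 0..N-1 ----

def GA (L : Nat) (N : Int) : List (List Int) :=
  (PySem.List.pyRange 0 N 1).foldl (fun og x => digitLoopA og x 0)
    (List.replicate L [0, 0, 0, 0, 0, 0, 0, 0, 0, 0])

theorem foldl_dl_len : ∀ (xs : List Int) (tbl : List (List Int)),
    (xs.foldl (fun og x => digitLoopA og x 0) tbl).length = tbl.length := by
  intro xs
  induction xs with
  | nil => intro tbl; rfl
  | cons x xs ih =>
    intro tbl
    rw [List.foldl_cons, ih, digitLoopA_len]

theorem foldl_dl_rows : ∀ (xs : List Int) (tbl : List (List Int)),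
    (∀ r ∈ tbl, r.length = 10) →
    ∀ r ∈ xs.foldl (fun og x => digitLoopA og x 0) tbl, r.length = 10 := by
  intro xs
  induction xs with
  | nil => intro tbl h; exact h
  | cons x xs ih =>
    intro tbl h
    rw [List.foldl_cons]
    exact ih _ (digitLoopA_rows _ _ _ h)

theorem GA_len (L : Nat) (N : Int) : (GA L N).length = L := by
  unfold GA
  rw [foldl_dl_len]
  simp

theorem GA_rows (L : Nat) (N : Int) : ∀ r ∈ GA L N, r.length = 10 := by
  unfold GA
  apply foldl_dl_rows
  intro r hr
  rw [List.eq_of_mem_replicate hr]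
  rfl

theorem rowZ_getD (d : Nat) : (([0,0,0,0,0,0,0,0,0,0] : List Int)).getD d 0 = 0 := by
  rcases d with _|_|_|_|_|_|_|_|_|_|d <;> rfl

theorem cntSpec_zero (p d : Int) : cntSpec 0 p d = 0 := by
  unfold cntSpec
  rw [PySem.List.pyRange_one_eq_nil le_rfl]
  rfl

theorem cntSpec_succ (N p d : Int) (hN : 0 ≤ N) :
    cntSpec (N + 1) p d = cntSpec N p d + indF N p d := by
  unfold cntSpec
  rw [PySem.List.pyRange_one_succ_right hN, List.map_append, List.sum_append]
  simp

theorem GA_entry (L : Nat) : ∀ (N : Int), 0 ≤ N → ∀ (j d : Nat), j < L → d < 10 →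
    Etab (GA L N) j d = cntSpec N ((10:Int) ^ j) (d : Int) := by
  intro N hN
  induction N, hN using Int.le_induction with
  | base =>
    intro j d hj _hd
    unfold GA
    rw [PySem.List.pyRange_one_eq_nil le_rfl, List.foldl_nil, cntSpec_zero]
    unfold Etab
    rw [List.getD_replicate _ hj]
    exact rowZ_getD d
  | succ N hN ih =>
    intro j d hj hd
    have hGA : GA L (N + 1) = digitLoopA (GA L N) N 0 := by
      unfold GA
      rw [PySem.List.pyRange_one_succ_right hN, List.foldl_append, List.foldl_cons,
        List.foldl_nil]
    rw [hGA, digitLoopA_entry (GA L N) N 0 hN j d (GA_rows L N) (by rw [GA_len]; exact hj) hd,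
      ih j d hj hd, cntSpec_succ N _ _ hN]
    congr 1
    unfold indF
    simp

-- ---- the closed-form count equals the enumerated count ----

theorem formula_step (N p d : Int) (hN : 0 ≤ N) (hp : 0 < p) (hd0 : 0 ≤ d) (hd9 : d ≤ 9) :
    formulaB (N+1) p d = formulaB N p d + indF (N+1) p d := by
  have hp10 : (0:Int) < 10 * p := by linarith
  unfold formulaB indF
  simp only [PySem.Int.floordiv_eq_ediv_of_pos hp10, PySem.Int.floordiv_eq_ediv_of_pos hp,
    PySem.Int.mod_eq_emod_of_pos hp, PySem.Int.mod_eq_emod_of_pos (show (0:Int) < 10 by norm_num)]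
  have hc : ∀ a : Int, a / (10 * p) = a / p / 10 := fun a => by
    rw [mul_comm, ← Int.ediv_ediv_of_nonneg (le_of_lt hp)]
  rw [hc, hc]
  have hdec1 := Int.mul_ediv_add_emod (N+1) p
  have hrnn : 0 ≤ (N+1) % p := Int.emod_nonneg _ (ne_of_gt hp)
  have hrlt : (N+1) % p < p := Int.emod_lt_of_pos _ hp
  have hqnn : 0 ≤ (N+1) / p := Int.ediv_nonneg (by omega) (le_of_lt hp)
  by_cases hr : (N+1) % p = 0
  · have hq1 : 1 ≤ (N+1) / p := by
      rcases lt_or_ge ((N+1)/p) 1 with hlt | hge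
      · exfalso
        have hq0 : (N+1) / p = 0 := by omega
        rw [hq0, mul_zero] at hdec1
        omega
      · exact hge
    have hNd : N / p = (N+1) / p - 1 ∧ N % p = p - 1 := by
      rw [Int.ediv_emod_unique hp]
      refine ⟨?_, by omega, by omega⟩
      have hrw : p * ((N+1)/p - 1) = p * ((N+1)/p) - p := by ring
      rw [hrw]
      omega
    rw [hNd.1, hNd.2]
    have hple : p ≤ p * ((N+1)/p) := by
      calc p = p * 1 := by ring
      _ ≤ p * ((N+1)/p) := mul_le_mul_of_nonneg_left hq1 (le_of_lt hp)
    by_cases hcz : ((N+1)/p) % 10 = 0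
    · have hq10 : 10 ≤ (N+1) / p := by omega
      have h1 : ((N+1)/p - 1) / 10 = ((N+1)/p) / 10 - 1 := by omega
      have h2 : ((N+1)/p - 1) % 10 = 9 := by omega
      rw [h1, h2]
      have hrw2 : (((N+1)/p)/10 - 1) * p = ((N+1)/p)/10 * p - p := by ring
      rw [hrw2]
      have hp10le : 10 * p ≤ p * ((N+1)/p) := by
        calc 10 * p = p * 10 := by ring
        _ ≤ p * ((N+1)/p) := mul_le_mul_of_nonneg_left hq10 (le_of_lt hp)
      rw [min_eq_right (by omega : p ≤ N + 1 + 1), min_eq_right (by omega : p ≤ N + 1)]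
      split_ifs <;> omega
    · have h1 : ((N+1)/p - 1) / 10 = ((N+1)/p) / 10 := by omega
      have h2 : ((N+1)/p - 1) % 10 = ((N+1)/p) % 10 - 1 := by omega
      rw [h1, h2]
      rw [min_eq_right (by omega : p ≤ N + 1 + 1), min_eq_right (by omega : p ≤ N + 1)]
      split_ifs <;> omega
  · have hNd : N / p = (N+1) / p ∧ N % p = (N+1) % p - 1 := by
      rw [Int.ediv_emod_unique hp]
      omega
    rw [hNd.1, hNd.2]
    by_cases hq : 0 < (N+1) / p
    · have hple : p ≤ p * ((N+1)/p) := by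
        calc p = p * 1 := by ring
        _ ≤ p * ((N+1)/p) := mul_le_mul_of_nonneg_left (by omega) (le_of_lt hp)
      rw [min_eq_right (by omega : p ≤ N + 1 + 1), min_eq_right (by omega : p ≤ N + 1)]
      split_ifs <;> omega
    · have hq0 : (N+1) / p = 0 := by omega
      rw [hq0] at hdec1 ⊢
      rw [mul_zero] at hdec1
      norm_num
      rw [min_eq_left (by omega : N + 1 + 1 ≤ p), min_eq_left (by omega : N + 1 ≤ p)]
      split_ifs <;> omega

theorem formula_base (p d : Int) (hp : 0 < p) (hd0 : 0 ≤ d) :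
    cntSpec 1 p d = formulaB 0 p d := by
  have h1 : cntSpec 1 p d = indF 0 p d := by
    rw [show (1:Int) = 0 + 1 by norm_num, cntSpec_succ 0 p d le_rfl, cntSpec_zero, zero_add]
  rw [h1]
  unfold indF formulaB
  have hz : ∀ b : Int, 0 < b → PySem.Int.floordiv 0 b = 0 := fun b hb => by
    rw [PySem.Int.floordiv_eq_ediv_of_pos hb]
    exact Int.zero_ediv b
  have hzm : PySem.Int.mod 0 p = 0 := by
    rw [PySem.Int.mod_eq_emod_of_pos hp]
    exact Int.zero_emod p
  have hzm10 : PySem.Int.mod 0 10 = 0 := by decide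
  rw [hz p hp, hz (10 * p) (by linarith), hzm, hzm10]
  simp only [lt_irrefl, false_and, if_false, zero_mul, zero_add]
  rw [min_eq_left (show (1:Int) ≤ p by omega)]
  split_ifs <;> omega

theorem cnt_formula (p d : Int) (hp : 0 < p) (hd0 : 0 ≤ d) (hd9 : d ≤ 9) :
    ∀ (N : Int), 0 ≤ N → cntSpec (N + 1) p d = formulaB N p d := by
  intro N hN
  induction N, hN using Int.le_induction with
  | base => exact formula_base p d hp hd0
  | succ N hN ih =>
    rw [cntSpec_succ (N + 1) p d (by omega), ih, formula_step N p d hN hp hd0 hd9]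

-- ---- decimal length of str(M) ----

def dlen (n : Nat) : Nat :=
  if n < 10 then 1 else dlen (n / 10) + 1
termination_by n
decreasing_by omega

theorem dlen_lt10 {n : Nat} (h : n < 10) : dlen n = 1 := by
  rw [dlen, if_pos h]

theorem dlen_ge10 {n : Nat} (h : ¬ n < 10) : dlen n = dlen (n / 10) + 1 := by
  conv_lhs => rw [dlen]
  rw [if_neg h]

theorem toDigitsCore_len : ∀ (f n : Nat) (l : List Char), n < f →
    (Nat.toDigitsCore 10 f n l).length = dlen n + l.length := by
  intro f
  induction f with
  | zero => intro n l hn; omega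
  | succ f ih =>
    intro n l hn
    rw [Nat.toDigitsCore]
    by_cases h : n / 10 = 0
    · simp only [h, reduceIte, dlen_lt10 (show n < 10 by omega)]
      simp
      omega
    · simp only [if_neg h]
      rw [ih (n / 10) _ (by omega), dlen_ge10 (show ¬ n < 10 by omega)]
      simp
      omega

theorem toStr_len (M : Int) (hM : 0 ≤ M) :
    (PySem.Int.toStr M).length = dlen M.toNat := by
  have h1 : (PySem.Int.toStr M).length = (PySem.Int.toChars M).length := by
    rw [← String.length_toList, PySem.Int.toList_toStr M]
  rw [h1]
  unfold PySem.Int.toChars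
  rw [if_neg (by omega)]
  unfold Nat.toDigits
  rw [toDigitsCore_len (M.toNat + 1) M.toNat [] (by omega)]
  simp

theorem dlen_pos (n : Nat) : 1 ≤ dlen n := by
  induction n using dlen.induct with
  | case1 n h => rw [dlen_lt10 h]
  | case2 n h ih => rw [dlen_ge10 h]; omega

theorem dlen_bounds : ∀ n : Nat, 1 ≤ n → 10 ^ (dlen n - 1) ≤ n ∧ n < 10 ^ dlen n := by
  intro n
  induction n using dlen.induct with
  | case1 n h =>
    intro hn
    rw [dlen_lt10 h]
    simpa using ⟨hn, h⟩
  | case2 n h ih =>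
    intro _hn
    have hrec := ih (by omega)
    rw [dlen_ge10 h]
    have hk := dlen_pos (n / 10)
    constructor
    · have : 10 ^ (dlen (n / 10) + 1 - 1) = 10 * 10 ^ (dlen (n / 10) - 1) := by
        rw [show dlen (n / 10) + 1 - 1 = (dlen (n / 10) - 1) + 1 by omega, pow_succ]
        ring
      rw [this]
      omega
    · rw [pow_succ]
      omega

theorem pow_le_iff_nat (m : Nat) (hm : 1 ≤ m) (j : Nat) : 10 ^ j ≤ m ↔ j < dlen m := by
  obtain ⟨hlo, hhi⟩ := dlen_bounds m hm
  constructor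
  · intro hle
    by_contra hcon
    have hge : dlen m ≤ j := by omega
    have : (10:Nat) ^ dlen m ≤ 10 ^ j := Nat.pow_le_pow_right (by norm_num) hge
    omega
  · intro hlt
    have : (10:Nat) ^ j ≤ 10 ^ (dlen m - 1) := Nat.pow_le_pow_right (by norm_num) (by omega)
    omega

theorem pow_le_iff (M : Int) (hM : 1 ≤ M) (j : Nat) :
    ((10:Int) ^ j ≤ M) ↔ j < dlen M.toNat := by
  have h1 : ((10:Int) ^ j ≤ M) ↔ (10 ^ j ≤ M.toNat) := by
    rw [show ((10:Int) ^ j) = ((10 ^ j : Nat) : Int) by push_cast; ring]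
    omega
  rw [h1]
  exact pow_le_iff_nat M.toNat (by omega) j

-- ---- the per-position contribution, and unrolling B's loop ----

def cntListB (M p : Int) : List Int :=
  (PySem.List.pyRange 0 10 1).foldl (fun cnt d =>
      let c := PySem.Int.floordiv M (10 * p) * p
      let c := if d < PySem.Int.mod (PySem.Int.floordiv M p) 10 then c + p
        else if d = PySem.Int.mod (PySem.Int.floordiv M p) 10 then c + PySem.Int.mod M p + 1
        else c
      let c := if d = 0 then c - min (M + 1) p else c
      cnt ++ [c]) []

def tListB (M R p : Int) : Int :=
  (PySem.List.pyRange 0 10 1).foldl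
    (fun t d => t + d * (powerB (cntListB M p) R).getD d.toNat 0) 0

theorem loopB_stop {R M s p : Int} (h : ¬ (p ≤ M ∧ 0 < p)) :
    loopB R M s p = PySem.Int.mod s 1000000009 := by
  conv_lhs => rw [loopB]
  rw [dif_neg h]

theorem loopB_go {R M s p : Int} (h : p ≤ M ∧ 0 < p) :
    loopB R M s p = loopB R M (s + tListB M R p * p) (10 * p) := by
  conv_lhs => rw [loopB]
  rw [dif_pos h]
  rfl

theorem cntListB_eq (M p : Int) :
    cntListB M p = (List.range 10).map (fun (dd : Nat) => formulaB M p (dd : Int)) := by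
  unfold cntListB formulaB
  rw [show PySem.List.pyRange 0 10 1 = [0,1,2,3,4,5,6,7,8,9] by decide,
    show List.range 10 = [0,1,2,3,4,5,6,7,8,9] by decide]
  simp only [List.foldl_cons, List.foldl_nil, List.map_cons, List.map_nil]
  norm_num

theorem loopB_sum (R M : Int) (L : Nat)
    (hiff : ∀ j : Nat, ((10:Int) ^ j ≤ M ↔ j < L)) :
    ∀ (n k : Nat), k + n = L → ∀ s : Int,
      loopB R M s ((10:Int) ^ k)
        = PySem.Int.mod
            (s + ((PySem.List.pyRange (k : Int) (L : Int) 1).map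
              (fun j => tListB M R ((10:Int) ^ j.toNat) * 10 ^ j.toNat)).sum) 1000000009 := by
  intro n
  induction n with
  | zero =>
    intro k hk s
    have hkL : k = L := by omega
    subst hkL
    rw [loopB_stop (by
      intro hcon
      exact absurd ((hiff k).mp hcon.1) (by omega))]
    rw [PySem.List.pyRange_one_eq_nil (le_refl (k : Int))]
    simp
  | succ n ih =>
    intro k hk s
    have hkL : k < L := by omega
    rw [loopB_go ⟨(hiff k).mpr hkL, by positivity⟩]
    rw [show (10:Int) * 10 ^ k = 10 ^ (k + 1) by rw [pow_succ]; ring]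
    rw [ih (k + 1) (by omega) _]
    rw [PySem.List.pyRange_one_cons (a := (k:Int)) (b := (L:Int)) (by exact_mod_cast hkL), List.map_cons, List.sum_cons]
    congr 1
    simp only [Int.toNat_natCast]
    push_cast
    ring

-- ---- rows of A's table are B's count lists ----

theorem row_eq (L : Nat) (M : Int) (hM : 1 ≤ M) (j : Nat) (hj : j < L) :
    (GA L (M + 1)).getD j [] = cntListB M ((10:Int) ^ j) := by
  have hjlen : j < (GA L (M + 1)).length := by rw [GA_len]; exact hj
  have hrow : ((GA L (M + 1)).getD j []).length = 10 := by
    rw [List.getD_eq_getElem _ _ hjlen]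
    exact GA_rows L (M + 1) _ (List.getElem_mem hjlen)
  rw [cntListB_eq]
  apply List.ext_getElem?
  intro d
  by_cases hd : d < 10
  · rw [List.getElem?_eq_getElem (by omega),
        List.getElem?_eq_getElem (by simp; omega)]
    have e1 : ((GA L (M + 1)).getD j [])[d]'(by omega) = Etab (GA L (M + 1)) j d := by
      unfold Etab
      exact (List.getD_eq_getElem _ _ (by omega)).symm
    have e2 : ((List.range 10).map (fun (dd : Nat) =>
        formulaB M ((10:Int)^j) (dd : Int)))[d]'(by simp; omega)
        = formulaB M ((10:Int)^j) (d : Int) := by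
      simp
    rw [e1, e2, GA_entry L (M + 1) (by omega) j d hj hd,
      cnt_formula ((10:Int) ^ j) (d : Int) (by positivity) (by omega) (by omega) M (by omega)]
  · rw [List.getElem?_eq_none (by omega), List.getElem?_eq_none (by simp; omega)]

-- ---- zero rows give zero contribution (M ≤ 0 case) ----

set_option maxRecDepth 8000 in
theorem foldl_stepP_zrow (v : List Int) (hv : v = [] ∨ v = rowZ) :
    ∀ (bits : List Int) (acc : List Int), acc = [] ∨ acc = rowZ →
      (bits.foldl (stepP v) acc = [] ∨ bits.foldl (stepP v) acc = rowZ) := by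
  intro bits
  induction bits with
  | nil => intro acc h; simpa using h
  | cons b bs ih =>
    intro acc hacc
    rw [List.foldl_cons]
    apply ih
    right
    rcases hv with h1 | h1 <;> rcases hacc with h2 | h2 <;> subst h1 <;> subst h2 <;>
      (by_cases hb : b = 1 <;> simp only [stepP, hb, reduceIte] <;> decide)

theorem powerB_zrow (R : Int) (v : List Int) (hv : v = [] ∨ v = rowZ) :
    powerB v R = [] ∨ powerB v R = rowZ := by
  rw [powerB_eq_foldl]
  exact foldl_stepP_zrow v hv _ v hv

theorem zero_t (f1 : List Int) (hf : f1 = [] ∨ f1 = rowZ) :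
    (PySem.List.pyRange 0 10 1).foldl (fun t d => t + d * f1.getD d.toNat 0) 0 = 0 := by
  rcases hf with h | h <;> subst h <;> decide

-- ---- main theorem ----

theorem F_eq (R M : Int) : F R M = F_alt R M := by
  by_cases hM : 1 ≤ M
  · have hL := toStr_len M (by omega)
    have hiff : ∀ j : Nat, ((10:Int) ^ j ≤ M ↔ j < (PySem.Int.toStr M).length) := by
      intro j
      rw [hL]
      exact pow_le_iff M hM j
    have hA : F R M = PySem.Int.mod
        (((PySem.List.pyRange 0 (((PySem.Int.toStr M).length : Nat) : Int) 1).map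
          (fun j => tListB M R ((10:Int) ^ j.toNat) * 10 ^ j.toNat)).sum) 1000000009 := by
      unfold F
      simp only []
      rw [show (PySem.List.pyRange 0 (M + 1) 1).foldl (fun og x => digitLoopA og x 0)
            (List.replicate (PySem.Int.toStr M).length [0,0,0,0,0,0,0,0,0,0])
          = GA (PySem.Int.toStr M).length (M + 1) from rfl]
      rw [PySem.List.foldl_add, zero_add]
      congr 1
      refine congrArg List.sum ?_
      apply List.map_congr_left
      intro j hj
      rw [PySem.List.mem_pyRange_one] at hj
      have hjt : j.toNat < (PySem.Int.toStr M).length := by omega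
      rw [row_eq _ M hM j.toNat hjt, power_eq]
      rfl
    rw [hA]
    rw [show F_alt R M = loopB R M 0 ((10:Int) ^ (0:Nat)) from by unfold F_alt; norm_num]
    rw [loopB_sum R M ((PySem.Int.toStr M).length) hiff ((PySem.Int.toStr M).length) 0
      (by omega) 0]
    norm_num
  · have hA : F R M = PySem.Int.mod 0 1000000009 := by
      unfold F
      simp only []
      have horigs : (PySem.List.pyRange 0 (M + 1) 1).foldl (fun og x => digitLoopA og x 0)
          (List.replicate (PySem.Int.toStr M).length [0,0,0,0,0,0,0,0,0,0])
          = List.replicate (PySem.Int.toStr M).length [0,0,0,0,0,0,0,0,0,0] := by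
        by_cases hM0 : M = 0
        · subst hM0
          rw [show PySem.List.pyRange 0 (0 + 1) 1 = [0] by decide, List.foldl_cons,
            List.foldl_nil, digitLoopA_stop (by norm_num)]
        · rw [PySem.List.pyRange_one_eq_nil (by omega), List.foldl_nil]
      rw [horigs]
      congr 1
      rw [PySem.List.foldl_add, zero_add]
      apply List.sum_eq_zero
      intro x hx
      rw [List.mem_map] at hx
      obtain ⟨j, hj, rfl⟩ := hx
      have hrow : (List.replicate (PySem.Int.toStr M).length
          ([0,0,0,0,0,0,0,0,0,0] : List Int)).getD j.toNat [] = []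
          ∨ (List.replicate (PySem.Int.toStr M).length
          ([0,0,0,0,0,0,0,0,0,0] : List Int)).getD j.toNat [] = rowZ := by
        by_cases hjt : j.toNat < (PySem.Int.toStr M).length
        · right
          rw [List.getD_replicate _ hjt]
          rfl
        · left
          rw [List.getD_eq_getElem?_getD, List.getElem?_eq_none (by simpa using hjt)]
          rfl
      rw [power_eq]
      rw [zero_t _ (powerB_zrow R _ hrow), zero_mul]
    have hB : F_alt R M = PySem.Int.mod 0 1000000009 := by
      unfold F_alt
      rw [loopB_stop (by omega)]
    rw [hA, hB]

-- ===== VERDICT (by name: the statement is the Claim_ definition above) =====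
theorem F_spec : Claim_equal_F := by
  intro R M _hD _hP
  unfold Spec_F
  exact F_eq R M
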